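-- pv_equiv track=rewrite | github.com/jramaswami/Binary_Search_Python | contacts.py | solve
-- ===== SOURCE A (Python) =====
-- def solve(contacts):
--     soln = 0
--     all_emails = set()
--     for emails in contacts:
--         if all_emails.isdisjoint(emails):
--             soln += 1
--         all_emails.update(emails)
--     return soln
-- ===== SOURCE B (Python) =====
-- def solve(contacts):
--     first_seen = {}
--     for i, emails in enumerate(contacts):
--         for e in emails:
--             if e not in first_seen:
--                 first_seen[e] = i
--     return sum(1 for i, emails in enumerate(contacts)
--                if all(first_seen[e] == i for e in emails))
-- ===== Notes on version B (the rewrite author's own statement) =====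
-- stated objective: alternative
-- what changed: Replaces A's single streaming pass with a running seen-set by two passes: first build a dict mapping each email to the index of the first contact containing it, then count the contacts whose every email first appeared in that very contact.
import Mathlib
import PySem

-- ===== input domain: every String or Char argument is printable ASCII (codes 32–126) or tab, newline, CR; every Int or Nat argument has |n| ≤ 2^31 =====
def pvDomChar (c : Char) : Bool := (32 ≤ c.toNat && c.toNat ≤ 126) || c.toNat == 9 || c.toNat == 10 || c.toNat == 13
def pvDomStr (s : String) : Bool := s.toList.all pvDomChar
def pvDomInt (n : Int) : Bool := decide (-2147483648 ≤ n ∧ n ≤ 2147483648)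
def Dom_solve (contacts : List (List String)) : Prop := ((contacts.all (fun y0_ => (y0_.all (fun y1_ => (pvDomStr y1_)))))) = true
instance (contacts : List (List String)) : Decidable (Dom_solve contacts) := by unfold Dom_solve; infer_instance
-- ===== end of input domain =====

-- B changes the decomposition: a first-seen index dict built in one pass, then a counting pass, instead of A's streaming seen-set (objective: alternative).

-- ===== PORT A =====
def solve (contacts : List (List String)) : Int :=
  (contacts.foldl
    (fun (st : Int × PySem.Set String) emails =>
      ((if PySem.Set.isdisjoint st.2 emails then st.1 + 1 else st.1),
       PySem.Set.update st.2 emails))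
    (0, PySem.Set.empty)).1

-- ===== PORT B =====
def solve_alt (contacts : List (List String)) : Int :=
  let firstSeen : PySem.Dict String Int :=
    (PySem.List.enumerate contacts).foldl
      (fun d p =>
        p.2.foldl (fun d e => if PySem.Dict.contains d e then d else PySem.Dict.insert d e p.1) d)
      PySem.Dict.empty
  (PySem.List.enumerate contacts).foldl
    (fun acc p => if p.2.all (fun e => PySem.Dict.get? firstSeen e == some p.1) then acc + 1 else acc)
    0

-- ===== PRECONDITION & SPEC =====
def Spec_solve (contacts : List (List String)) (out : Int) : Prop := out = solve_alt contacts
instance (contacts : List (List String)) (out : Int) : Decidable (Spec_solve contacts out) := by unfold Spec_solve; infer_instance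

-- ===== CLAIM (what is proved, stated in full; the proofs are below) =====
def Claim_equal_solve : Prop := ∀ (contacts : List (List String)), Dom_solve contacts → Spec_solve contacts (solve contacts)

-- ===== LEMMAS AND PROOFS =====

-- A's loop as a structural recursion
def recA (s : PySem.Set String) : List (List String) → Int
  | [] => 0
  | es :: rest => (if PySem.Set.isdisjoint s es then 1 else 0) + recA (PySem.Set.update s es) rest

-- B's inner loop over one contact
def insAll (d : PySem.Dict String Int) (i : Int) (es : List String) : PySem.Dict String Int :=
  es.foldl (fun d e => if PySem.Dict.contains d e then d else PySem.Dict.insert d e i) d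

-- B's first pass as a structural recursion
def build (i : Int) (d : PySem.Dict String Int) : List (List String) → PySem.Dict String Int
  | [] => d
  | es :: rest => build (i + 1) (insAll d i es) rest

-- B's second pass as a structural recursion
def countPass (D : PySem.Dict String Int) (i : Int) : List (List String) → Int
  | [] => 0
  | es :: rest =>
      (if es.all (fun e => PySem.Dict.get? D e == some i) then 1 else 0) + countPass D (i + 1) rest

theorem foldlA_eq_recA (l : List (List String)) (s : PySem.Set String) (c : Int) :
    (l.foldl
      (fun (st : Int × PySem.Set String) emails =>
        ((if PySem.Set.isdisjoint st.2 emails then st.1 + 1 else st.1),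
         PySem.Set.update st.2 emails)) (c, s)).1 = c + recA s l := by
  induction l generalizing s c with
  | nil => simp [recA]
  | cons es rest ih =>
      simp only [List.foldl_cons, recA]
      rw [ih]
      by_cases h : PySem.Set.isdisjoint s es <;> simp [h] <;> ring

theorem foldlB_build (l : List (List String)) (i : Int) (d : PySem.Dict String Int) :
    (PySem.List.enumerate l i).foldl
      (fun d p =>
        p.2.foldl (fun d e => if PySem.Dict.contains d e then d else PySem.Dict.insert d e p.1) d)
      d = build i d l := by
  induction l generalizing i d with
  | nil => simp [PySem.List.enumerate_nil, build]
  | cons es rest ih =>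
      rw [PySem.List.enumerate_cons]
      simp only [List.foldl_cons]
      rw [ih]
      rfl

theorem foldlB_count (D : PySem.Dict String Int) (l : List (List String)) (i : Int) (c : Int) :
    (PySem.List.enumerate l i).foldl
      (fun acc p => if p.2.all (fun e => PySem.Dict.get? D e == some p.1) then acc + 1 else acc)
      c = c + countPass D i l := by
  induction l generalizing i c with
  | nil => simp [PySem.List.enumerate_nil, countPass]
  | cons es rest ih =>
      rw [PySem.List.enumerate_cons]
      simp only [List.foldl_cons, countPass]
      rw [ih]
      by_cases h : es.all (fun e => PySem.Dict.get? D e == some i) <;> simp [h] <;> ring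

theorem insAll_cons (d : PySem.Dict String Int) (i : Int) (x : String) (xs : List String) :
    insAll d i (x :: xs) = insAll (if PySem.Dict.contains d x then d else PySem.Dict.insert d x i) i xs := rfl

theorem get?_some_contains (d : PySem.Dict String Int) (e : String) (v : Int)
    (h : PySem.Dict.get? d e = some v) : PySem.Dict.contains d e = true := by
  by_contra hc
  have := (PySem.Dict.get?_eq_none_iff_contains d e).mpr (by simpa using hc)
  rw [h] at this; cases this

theorem contains_exists_get? (d : PySem.Dict String Int) (e : String)
    (h : PySem.Dict.contains d e = true) : ∃ v, PySem.Dict.get? d e = some v := by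
  cases hg : PySem.Dict.get? d e with
  | some v => exact ⟨v, rfl⟩
  | none =>
      rw [(PySem.Dict.get?_eq_none_iff_contains d e).mp hg] at h
      cases h

theorem insAll_get?_of_contains (es : List String) (d : PySem.Dict String Int) (i : Int)
    (e : String) (h : PySem.Dict.contains d e = true) :
    PySem.Dict.get? (insAll d i es) e = PySem.Dict.get? d e := by
  induction es generalizing d with
  | nil => rfl
  | cons x xs ih =>
      rw [insAll_cons]
      by_cases hx : PySem.Dict.contains d x
      · rw [if_pos hx]; exact ih d h
      · rw [if_neg hx]
        have hne : e ≠ x := by rintro rfl; rw [h] at hx; exact hx rfl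
        have hc : PySem.Dict.contains (PySem.Dict.insert d x i) e = true := by
          rw [PySem.Dict.contains_insert]; simp [h]
        rw [ih _ hc, PySem.Dict.get?_insert_of_ne _ _ hne]

theorem insAll_get?_of_not_mem (es : List String) (d : PySem.Dict String Int) (i : Int)
    (e : String) (h : e ∉ es) :
    PySem.Dict.get? (insAll d i es) e = PySem.Dict.get? d e := by
  induction es generalizing d with
  | nil => rfl
  | cons x xs ih =>
      rw [insAll_cons]
      have hne : e ≠ x := fun hh => h (hh ▸ List.mem_cons_self ..)
      have hxs : e ∉ xs := fun hh => h (List.mem_cons_of_mem _ hh)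
      by_cases hx : PySem.Dict.contains d x
      · rw [if_pos hx]; exact ih _ hxs
      · rw [if_neg hx, ih _ hxs, PySem.Dict.get?_insert_of_ne _ _ hne]

theorem insAll_get?_of_mem_not_contains (es : List String) (d : PySem.Dict String Int) (i : Int)
    (e : String) (hm : e ∈ es) (h : PySem.Dict.contains d e = false) :
    PySem.Dict.get? (insAll d i es) e = some i := by
  induction es generalizing d with
  | nil => cases hm
  | cons x xs ih =>
      rw [insAll_cons]
      by_cases hex : e = x
      · subst hex
        rw [if_neg (by simp [h])]
        by_cases hxs : e ∈ xs
        · have hc : PySem.Dict.contains (PySem.Dict.insert d e i) e = true :=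
            PySem.Dict.contains_insert_self _ _ _
          rw [insAll_get?_of_contains xs _ i e hc, PySem.Dict.get?_insert_self]
        · rw [insAll_get?_of_not_mem xs _ i e hxs, PySem.Dict.get?_insert_self]
      · rcases List.mem_cons.mp hm with rfl | hxs
        · exact absurd rfl hex
        · by_cases hx : PySem.Dict.contains d x
          · rw [if_pos hx]; exact ih _ hxs h
          · rw [if_neg hx]
            refine ih _ hxs ?_
            rw [PySem.Dict.contains_insert]; simp [h, hex]

theorem insAll_contains (es : List String) (d : PySem.Dict String Int) (i : Int) (e : String) :
    PySem.Dict.contains (insAll d i es) e = (PySem.Dict.contains d e || decide (e ∈ es)) := by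
  by_cases hd : PySem.Dict.contains d e
  · rw [hd, Bool.true_or]
    obtain ⟨v, hv⟩ := contains_exists_get? d e hd
    exact get?_some_contains _ e v (by rw [insAll_get?_of_contains es d i e hd]; exact hv)
  · have hdf : PySem.Dict.contains d e = false := by simpa using hd
    rw [hdf, Bool.false_or]
    by_cases hm : e ∈ es
    · simp only [hm, decide_true]
      exact get?_some_contains _ e i (insAll_get?_of_mem_not_contains es d i e hm hdf)
    · simp only [hm, decide_false]
      have hnone : PySem.Dict.get? (insAll d i es) e = none := by
        rw [insAll_get?_of_not_mem es d i e hm]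
        exact (PySem.Dict.get?_eq_none_iff_contains d e).mpr hdf
      exact (PySem.Dict.get?_eq_none_iff_contains _ e).mp hnone

theorem build_stable (l : List (List String)) (i : Int) (d : PySem.Dict String Int)
    (e : String) (v : Int) (h : PySem.Dict.get? d e = some v) :
    PySem.Dict.get? (build i d l) e = some v := by
  induction l generalizing i d with
  | nil => exact h
  | cons es rest ih =>
      simp only [build]
      refine ih _ _ ?_
      rw [insAll_get?_of_contains es d i e (get?_some_contains d e v h), h]

-- Main invariant: A's recursion with seen-set s equals B's counting pass over the full dict,
-- provided s and d have the same keys and every value in d is < i.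
theorem main_inv (l : List (List String)) (i : Int) (d : PySem.Dict String Int)
    (s : PySem.Set String)
    (hkeys : ∀ e, PySem.Set.contains s e = PySem.Dict.contains d e)
    (hlt : ∀ e v, PySem.Dict.get? d e = some v → v < i) :
    recA s l = countPass (build i d l) i l := by
  induction l generalizing i d s with
  | nil => rfl
  | cons es rest ih =>
      simp only [recA, countPass]
      have hbuild : build i d (es :: rest) = build (i + 1) (insAll d i es) rest := rfl
      rw [hbuild]
      have hd' : ∀ e v, PySem.Dict.get? (insAll d i es) e = some v → v < i + 1 := by
        intro e v hv
        by_cases hc : PySem.Dict.contains d e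
        · rw [insAll_get?_of_contains es d i e hc] at hv
          have := hlt e v hv; omega
        · by_cases hm : e ∈ es
          · rw [insAll_get?_of_mem_not_contains es d i e hm (by simpa using hc)] at hv
            cases hv; omega
          · rw [insAll_get?_of_not_mem es d i e hm] at hv
            have := hlt e v hv; omega
      have hk' : ∀ e, PySem.Set.contains (PySem.Set.update s es) e
                      = PySem.Dict.contains (insAll d i es) e := by
        intro e
        rw [insAll_contains, ← hkeys e]
        by_cases hmem : e ∈ PySem.Set.update s es
        · rw [(PySem.Set.contains_iff _ _).mpr hmem]
          rcases (PySem.Set.mem_update s es e).mp hmem with h | h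
          · rw [(PySem.Set.contains_iff _ _).mpr h]; rfl
          · simp [h]
        · have h1 : PySem.Set.contains (PySem.Set.update s es) e = false := by
            cases hb : PySem.Set.contains (PySem.Set.update s es) e
            · rfl
            · exact absurd ((PySem.Set.contains_iff _ _).mp hb) hmem
          rw [h1]
          have hns : e ∉ s := fun h => hmem ((PySem.Set.mem_update s es e).mpr (Or.inl h))
          have hne : e ∉ es := fun h => hmem ((PySem.Set.mem_update s es e).mpr (Or.inr h))
          have h2 : PySem.Set.contains s e = false := by
            cases hb : PySem.Set.contains s e
            · rfl
            · exact absurd ((PySem.Set.contains_iff _ _).mp hb) hns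
          simp [h2, hne, hns]
      rw [← ih (i + 1) (insAll d i es) (PySem.Set.update s es) hk' hd']
      have hhead : (es.all (fun e =>
          PySem.Dict.get? (build (i + 1) (insAll d i es) rest) e == some i))
          = PySem.Set.isdisjoint s es := by
        by_cases hdj : PySem.Set.isdisjoint s es = true
        · rw [hdj, List.all_eq_true]
          have hdisj := (PySem.Set.isdisjoint_iff s es).mp hdj
          intro e he
          have hsc : PySem.Set.contains s e = false := by
            cases hb : PySem.Set.contains s e
            · rfl
            · exact absurd he (hdisj e ((PySem.Set.contains_iff s e).mp hb))
          have hdc : PySem.Dict.contains d e = false := by rw [← hkeys]; exact hsc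
          rw [build_stable rest (i + 1) _ e i
            (insAll_get?_of_mem_not_contains es d i e he hdc)]
          simp
        · have hdf : PySem.Set.isdisjoint s es = false := Bool.eq_false_iff.mpr hdj
          rw [hdf]
          have hnot : ¬ ∀ x ∈ s, x ∉ es := fun hh => hdj ((PySem.Set.isdisjoint_iff s es).mpr hh)
          push_neg at hnot
          obtain ⟨x, hxs, hxes⟩ := hnot
          refine List.all_eq_false.mpr ⟨x, hxes, ?_⟩
          have hc : PySem.Dict.contains d x = true := by
            rw [← hkeys x]; exact (PySem.Set.contains_iff s x).mpr hxs
          obtain ⟨v, hv⟩ := contains_exists_get? d x hc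
          have hvlt := hlt x v hv
          have h2 := build_stable rest (i + 1) (insAll d i es) x v
            (by rw [insAll_get?_of_contains es d i x hc]; exact hv)
          simp only [h2, beq_iff_eq, Option.some.injEq]
          omega
      simp only [hhead]

theorem solve_eq_recA (contacts : List (List String)) :
    solve contacts = recA PySem.Set.empty contacts := by
  unfold solve
  rw [foldlA_eq_recA]
  ring

theorem solve_alt_eq (contacts : List (List String)) :
    solve_alt contacts = countPass (build 0 PySem.Dict.empty contacts) 0 contacts := by
  unfold solve_alt
  rw [foldlB_build, foldlB_count]
  ring

-- ===== VERDICT (by name: the statement is the Claim_ definition above) =====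
theorem solve_spec : Claim_equal_solve := by
  intro contacts _
  unfold Spec_solve
  rw [solve_eq_recA, solve_alt_eq]
  exact main_inv contacts 0 PySem.Dict.empty PySem.Set.empty
    (fun e => rfl)
    (fun e v h => by simp [PySem.Dict.get?, PySem.Dict.empty] at h)
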